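-- pv_equiv track=rewrite | github.com/Boykinz/codewars-solutions | 6_kyu/english_beggars.py | beggars
-- ===== SOURCE A (Python) =====
-- def beggars(arr, k):
--     n, x = len(arr), [0] * k
--     is_visited = set()
--     for b in range(k):
--         for i in range(b, n, k):
--             if i in is_visited:
--                 continue
--             else:
--                 x[b] += arr[i]
--                 is_visited.add(i)
--     return x
-- ===== SOURCE B (Python) =====
-- def beggars(arr, k):
--     if k <= 0:
--         return []
--     x = [0] * k
--     for i, v in enumerate(arr):
--         x[i % k] += v
--     return x
-- ===== Notes on version B (the rewrite author's own statement) =====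
-- stated objective: simpler
-- what changed: Replaces A's k nested strided passes with a redundant visited-set by one linear sweep that adds each element to bucket i % k.
import Mathlib
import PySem

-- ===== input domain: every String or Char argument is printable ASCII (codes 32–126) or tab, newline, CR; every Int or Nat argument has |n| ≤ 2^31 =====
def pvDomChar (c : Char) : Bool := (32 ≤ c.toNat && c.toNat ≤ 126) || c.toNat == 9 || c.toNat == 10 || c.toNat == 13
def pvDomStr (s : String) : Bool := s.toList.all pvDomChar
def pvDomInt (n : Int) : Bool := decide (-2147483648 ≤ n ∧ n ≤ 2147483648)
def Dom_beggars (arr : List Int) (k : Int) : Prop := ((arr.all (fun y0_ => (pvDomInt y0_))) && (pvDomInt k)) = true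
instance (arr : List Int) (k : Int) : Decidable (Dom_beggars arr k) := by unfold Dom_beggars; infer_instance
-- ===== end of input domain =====

-- B replaces A's k nested strided passes (with a redundant visited set) by one
-- linear sweep adding each element to bucket i % k (objective: simpler).

-- ===== PORT A =====
-- [0] * k is empty for k ≤ 0, as in Python (k.toNat = 0 then).
-- Indices b (into x) and i (into arr) are always in range, so pyGetD/pySetD defaults are never used.
def beggars (arr : List Int) (k : Int) : List Int :=
  let n : Int := PySem.List.len arr
  let x : List Int := List.replicate k.toNat 0
  ((PySem.List.pyRange 0 k 1).foldl
      (fun st b =>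
        (PySem.List.pyRange b n k).foldl
          (fun st2 i =>
            if PySem.Set.contains st2.2 i then st2
            else (PySem.List.pySetD st2.1 b (PySem.List.pyGetD st2.1 b 0 + PySem.List.pyGetD arr i 0),
                  PySem.Set.add st2.2 i))
          st)
      (x, (PySem.Set.empty : PySem.Set Int))).1

-- ===== PORT B =====
def beggars_alt (arr : List Int) (k : Int) : List Int :=
  if k ≤ 0 then []
  else
    (PySem.List.enumerate arr 0).foldl
      (fun x p =>
        PySem.List.pySetD x (PySem.Int.mod p.1 k)
          (PySem.List.pyGetD x (PySem.Int.mod p.1 k) 0 + p.2))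
      (List.replicate k.toNat 0)

-- ===== PRECONDITION & SPEC =====
def Spec_beggars (arr : List Int) (k : Int) (out : List Int) : Prop := out = beggars_alt arr k
instance (arr : List Int) (k : Int) (out : List Int) : Decidable (Spec_beggars arr k out) := by unfold Spec_beggars; infer_instance

-- ===== CLAIM (what is proved, stated in full; the proofs are below) =====
def Claim_equal_beggars : Prop := ∀ (arr : List Int) (k : Int), Dom_beggars arr k → Spec_beggars arr k (beggars arr k)

-- ===== LEMMAS AND PROOFS =====

-- value of arr at index i (always hit in range below)
def pvIdxVal (arr : List Int) (i : Int) : Int := PySem.List.pyGetD arr i 0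

-- sum of arr-values over a list of indices
def pvS (arr : List Int) (l : List Int) : Int := (l.map (pvIdxVal arr)).sum

-- the indices of beggar j's stride
def pvStride (arr : List Int) (k j : Int) : List Int :=
  PySem.List.pyRange j (PySem.List.len arr) k

-- the common value of both programs for k > 0
def pvTarget (arr : List Int) (k : Int) : List Int :=
  (List.range k.toNat).map (fun j : Nat => pvS arr (pvStride arr k (j : Int)))

-- the body of A's inner loop
def pvAstep (arr : List Int) (b : Int) :
    (List Int × PySem.Set Int) → Int → (List Int × PySem.Set Int) := fun st2 i =>
  if PySem.Set.contains st2.2 i then st2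
  else (PySem.List.pySetD st2.1 b (PySem.List.pyGetD st2.1 b 0 + PySem.List.pyGetD arr i 0),
        PySem.Set.add st2.2 i)

-- the body of A's outer loop
def pvOuter (arr : List Int) (k : Int) :
    (List Int × PySem.Set Int) → Int → (List Int × PySem.Set Int) := fun st b =>
  (PySem.List.pyRange b (PySem.List.len arr) k).foldl (pvAstep arr b) st

-- the body of B's loop
def pvBstep (k : Int) : List Int → (Int × Int) → List Int := fun x p =>
  PySem.List.pySetD x (PySem.Int.mod p.1 k)
    (PySem.List.pyGetD x (PySem.Int.mod p.1 k) 0 + p.2)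

theorem pvPairwise_lt_pyRange_pos (a b : Int) {s : Int} (hs : 0 < s) :
    List.Pairwise (· < ·) (PySem.List.pyRange a b s) := by
  rw [PySem.List.pyRange_of_pos a b hs]
  refine List.Pairwise.map _ ?_ List.pairwise_lt_range
  intro x y hxy
  have : (x : Int) < (y : Int) := by exact_mod_cast hxy
  nlinarith

theorem pvNodup_pyRange_pos (a b : Int) {s : Int} (hs : 0 < s) :
    (PySem.List.pyRange a b s).Nodup := by
  exact (pvPairwise_lt_pyRange_pos a b hs).imp ne_of_lt

theorem pvMem_stride {arr : List Int} {k j : Int} (hk : 0 < k) (hj : 0 ≤ j) (hjk : j < k)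
    (x : Int) : x ∈ pvStride arr k j ↔ 0 ≤ x ∧ x < PySem.List.len arr ∧ x % k = j := by
  unfold pvStride
  rw [PySem.List.mem_pyRange_iff_of_pos hk]
  constructor
  · rintro ⟨h1, h2, t, ht⟩
    have hx : x = j + k * t := by omega
    subst hx
    rw [Int.add_mul_emod_self_left, Int.emod_eq_of_lt hj hjk]
    exact ⟨by omega, h2, rfl⟩
  · rintro ⟨h0, h2, hm⟩
    have hq : 0 ≤ x / k := Int.ediv_nonneg h0 (le_of_lt hk)
    have hdm := Int.ediv_add_emod x k
    refine ⟨?_, h2, ⟨x / k, by omega⟩⟩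
    nlinarith

theorem pvStride_eq_filter {arr : List Int} {k j : Int} (hk : 0 < k) (hj : 0 ≤ j) (hjk : j < k) :
    (PySem.List.pyRange 0 (PySem.List.len arr) 1).filter
        (fun i => decide (PySem.Int.mod i k = j)) = pvStride arr k j := by
  have nd1 : ((PySem.List.pyRange 0 (PySem.List.len arr) 1).filter
      (fun i => decide (PySem.Int.mod i k = j))).Nodup :=
    (PySem.List.nodup_pyRange_one 0 _).filter _
  have nd2 : (pvStride arr k j).Nodup := pvNodup_pyRange_pos _ _ hk
  have hmem : ∀ x, x ∈ (PySem.List.pyRange 0 (PySem.List.len arr) 1).filter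
      (fun i => decide (PySem.Int.mod i k = j)) ↔ x ∈ pvStride arr k j := by
    intro x
    rw [List.mem_filter, PySem.List.mem_pyRange_one, pvMem_stride hk hj hjk,
      PySem.Int.mod_eq_emod_of_pos hk]
    simp only [decide_eq_true_eq]
    tauto
  have hperm := (List.perm_ext_iff_of_nodup nd1 nd2).mpr hmem
  exact List.eq_of_perm_of_sorted (fun a b _ _ h1 h2 => le_antisymm h1 h2)
    (((PySem.List.pairwise_lt_pyRange_one 0 _).filter _).imp le_of_lt)
    ((pvPairwise_lt_pyRange_pos _ _ hk).imp le_of_lt) hperm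

theorem pvGetD_set (x : List Int) (a j : Nat) (v : Int) (ha : a < x.length) :
    (x.set a v).getD j 0 = if j = a then v else x.getD j 0 := by
  rw [List.getD_eq_getElem?_getD, List.getElem?_set]
  by_cases h : a = j
  · subst h; simp [ha]
  · simp [h, Ne.symm h, List.getD_eq_getElem?_getD]

-- ----- B side -----

theorem pvB_len (k : Int) : ∀ (l : List (Int × Int)) (x : List Int),
    (l.foldl (pvBstep k) x).length = x.length := by
  intro l
  induction l with
  | nil => intro x; rfl
  | cons p t ih =>
    intro x
    simp only [List.foldl_cons, ih, pvBstep, PySem.List.length_pySetD]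

theorem pvB_getD {k : Int} (hk : 0 < k) : ∀ (l : List (Int × Int)) (x : List Int) (j : Nat),
    x.length = k.toNat → j < k.toNat → (∀ p ∈ l, 0 ≤ p.1) →
    (l.foldl (pvBstep k) x).getD j 0 =
      x.getD j 0 + ((l.filter (fun p => decide (PySem.Int.mod p.1 k = (j : Int)))).map (·.2)).sum := by
  intro l
  induction l with
  | nil => intro x j _ _ _; simp
  | cons p t ih =>
    intro x j hx hj hpos
    have hm0 : 0 ≤ p.1 % k := Int.emod_nonneg p.1 (by omega)
    have hmk : p.1 % k < k := Int.emod_lt_of_pos p.1 hk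
    have hmod : PySem.Int.mod p.1 k = p.1 % k := PySem.Int.mod_eq_emod_of_pos hk
    have hstep : pvBstep k x p = x.set (p.1 % k).toNat (x.getD (p.1 % k).toNat 0 + p.2) := by
      simp only [pvBstep, hmod, PySem.List.pySetD_of_nonneg _ _ hm0,
        PySem.List.pyGetD_of_nonneg _ _ hm0]
    have hlen' : (x.set (p.1 % k).toNat (x.getD (p.1 % k).toNat 0 + p.2)).length = k.toNat := by
      simpa using hx
    have htail : ∀ q ∈ t, 0 ≤ q.1 := fun q hq => hpos q (List.mem_cons_of_mem _ hq)
    rw [List.foldl_cons, hstep, ih _ j hlen' hj htail,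
      pvGetD_set x _ j _ (by omega)]
    by_cases hm : p.1 % k = (j : Int)
    · have hmn : j = (p.1 % k).toNat := by omega
      rw [List.filter_cons_of_pos (by simp [hmod, hm]), if_pos hmn, ← hmn]
      simp
      ring
    · have hmn : j ≠ (p.1 % k).toNat := by omega
      rw [List.filter_cons_of_neg (by simp [hmod, hm]), if_neg hmn]

theorem pvB_eq_target (arr : List Int) (k : Int) (hk : 0 < k) :
    beggars_alt arr k = pvTarget arr k := by
  have hnotle : ¬ k ≤ 0 := by omega
  have hBdef : beggars_alt arr k =
      (PySem.List.enumerate arr 0).foldl (pvBstep k) (List.replicate k.toNat 0) := by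
    simp only [beggars_alt, if_neg hnotle]; rfl
  have hlen : (beggars_alt arr k).length = k.toNat := by
    rw [hBdef, pvB_len]; simp
  have hlent : (pvTarget arr k).length = k.toNat := by simp [pvTarget]
  apply List.ext_getElem (by omega)
  intro j h1 h2
  have hj : j < k.toNat := by omega
  have hjk : (j : Int) < k := by omega
  have hpos : ∀ p ∈ PySem.List.enumerate arr 0, 0 ≤ p.1 := by
    intro p hp
    rw [PySem.List.mem_enumerate_iff] at hp
    obtain ⟨m, hm, rfl⟩ := hp
    simp
  rw [← List.getD_eq_getElem _ 0 h1, hBdef, pvB_getD hk _ _ j (by simp) hj hpos]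
  have henum : PySem.List.enumerate arr 0 =
      (PySem.List.pyRange 0 (PySem.List.len arr) 1).map
        (fun i => (i, PySem.List.pyGetD arr i 0)) :=
    PySem.List.enumerate_eq_map_pyRange arr 0
  rw [henum, List.filter_map, List.map_map]
  have hpred : ((fun p : Int × Int => decide (PySem.Int.mod p.1 k = (j : Int))) ∘
      (fun i : Int => (i, PySem.List.pyGetD arr i 0))) =
      (fun i : Int => decide (PySem.Int.mod i k = (j : Int))) := rfl
  rw [hpred, pvStride_eq_filter hk (by omega) hjk]
  have htar : (pvTarget arr k)[j]'h2 = pvS arr (pvStride arr k (j : Int)) := by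
    simp only [pvTarget, List.getElem_map, List.getElem_range]
  rw [htar]
  have hz : (List.replicate k.toNat (0 : Int)).getD j 0 = 0 := by
    simp [List.getD_eq_getElem?_getD]
  rw [hz, zero_add]
  rfl

-- ----- A side -----

theorem pvInner_snd (arr : List Int) (b : Int) : ∀ (l : List Int) (x : List Int) (vis : PySem.Set Int),
    (∀ i ∈ l, i ∉ vis) → l.Nodup → (l.foldl (pvAstep arr b) (x, vis)).2 = vis ++ l := by
  intro l
  induction l with
  | nil => intro x vis _ _; simp
  | cons i t ih =>
    intro x vis hdis hnd
    have hiv : i ∉ vis := hdis i (List.mem_cons_self)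
    have hcont : PySem.Set.contains vis i = false := by simp [PySem.Set.contains, hiv]
    rw [List.foldl_cons]
    have hstep : pvAstep arr b (x, vis) i =
        (PySem.List.pySetD x b (PySem.List.pyGetD x b 0 + PySem.List.pyGetD arr i 0),
          vis ++ [i]) := by
      simp only [pvAstep, hcont, if_neg Bool.false_ne_true,
        PySem.Set.add_of_not_mem hiv]
    rw [hstep, ih _ _ ?_ hnd.of_cons]
    · simp
    · intro i' hi'
      have hne : i' ≠ i := by
        intro h; exact (List.nodup_cons.mp hnd).1 (h ▸ hi')
      simp only [List.mem_append, List.mem_singleton]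
      push_neg
      exact ⟨hdis i' (List.mem_cons_of_mem _ hi'), hne⟩

theorem pvInner_len (arr : List Int) (b : Int) : ∀ (l : List Int) (st : List Int × PySem.Set Int),
    ((l.foldl (pvAstep arr b) st).1).length = st.1.length := by
  intro l
  induction l with
  | nil => intro st; rfl
  | cons i t ih =>
    intro st
    rw [List.foldl_cons, ih]
    unfold pvAstep
    split
    · rfl
    · simp [PySem.List.length_pySetD]

theorem pvInner_getD (arr : List Int) (b : Int) (hb : 0 ≤ b) :
    ∀ (l : List Int) (x : List Int) (vis : PySem.Set Int) (j : Nat),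
    b.toNat < x.length → (∀ i ∈ l, i ∉ vis) → l.Nodup →
    ((l.foldl (pvAstep arr b) (x, vis)).1).getD j 0 =
      if j = b.toNat then x.getD j 0 + pvS arr l else x.getD j 0 := by
  intro l
  induction l with
  | nil => intro x vis j _ _ _; simp [pvS]
  | cons i t ih =>
    intro x vis j hbl hdis hnd
    have hiv : i ∉ vis := hdis i (List.mem_cons_self)
    have hcont : PySem.Set.contains vis i = false := by simp [PySem.Set.contains, hiv]
    have hstep : pvAstep arr b (x, vis) i =
        (x.set b.toNat (x.getD b.toNat 0 + PySem.List.pyGetD arr i 0), vis ++ [i]) := by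
      simp only [pvAstep, hcont, if_neg Bool.false_ne_true,
        PySem.Set.add_of_not_mem hiv, PySem.List.pySetD_of_nonneg _ _ hb,
        PySem.List.pyGetD_of_nonneg _ _ hb]
    have hdis' : ∀ i' ∈ t, i' ∉ vis ++ [i] := by
      intro i' hi'
      have hne : i' ≠ i := by
        intro h; exact (List.nodup_cons.mp hnd).1 (h ▸ hi')
      simp only [List.mem_append, List.mem_singleton]
      push_neg
      exact ⟨hdis i' (List.mem_cons_of_mem _ hi'), hne⟩
    rw [List.foldl_cons, hstep,
      ih _ _ j (by simpa using hbl) hdis' hnd.of_cons]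
    rw [pvGetD_set x _ j _ (by omega)]
    by_cases hj : j = b.toNat
    · subst hj
      simp [pvS, pvIdxVal]
      ring
    · rw [if_neg hj, if_neg hj, if_neg hj]

theorem pvOuter_len (arr : List Int) (k : Int) : ∀ (bl : List Int) (st : List Int × PySem.Set Int),
    ((bl.foldl (pvOuter arr k) st).1).length = st.1.length := by
  intro bl
  induction bl with
  | nil => intro st; rfl
  | cons b t ih =>
    intro st
    rw [List.foldl_cons, ih, pvOuter, pvInner_len]

theorem pvOuter_getD (arr : List Int) {k : Int} (hk : 0 < k) :
    ∀ (bl : List Int) (x : List Int) (vis : PySem.Set Int) (j : Nat),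
    x.length = k.toNat → (∀ b ∈ bl, 0 ≤ b ∧ b < k) → bl.Nodup →
    (∀ i ∈ vis, ∀ b ∈ bl, i ∉ pvStride arr k b) → j < k.toNat →
    ((bl.foldl (pvOuter arr k) (x, vis)).1).getD j 0 =
      if (j : Int) ∈ bl then x.getD j 0 + pvS arr (pvStride arr k (j : Int)) else x.getD j 0 := by
  intro bl
  induction bl with
  | nil => intro x vis j _ _ _ _ _; simp
  | cons b0 t ih =>
    intro x vis j hx hbnd hnd hinv hj
    have hb0 := hbnd b0 (List.mem_cons_self)
    have hndl : (pvStride arr k b0).Nodup := pvNodup_pyRange_pos _ _ hk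
    have hdis : ∀ i ∈ pvStride arr k b0, i ∉ vis := by
      intro i hi hiv
      exact hinv i hiv b0 (List.mem_cons_self) hi
    have hpair : pvOuter arr k (x, vis) b0 =
        ((pvOuter arr k (x, vis) b0).1, (pvOuter arr k (x, vis) b0).2) := rfl
    have hsnd : (pvOuter arr k (x, vis) b0).2 = vis ++ pvStride arr k b0 :=
      pvInner_snd arr b0 _ x vis hdis hndl
    have hfst : ∀ (j' : Nat), ((pvOuter arr k (x, vis) b0).1).getD j' 0 =
        if j' = b0.toNat then x.getD j' 0 + pvS arr (pvStride arr k b0) else x.getD j' 0 := by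
      intro j'
      exact pvInner_getD arr b0 hb0.1 _ x vis j' (by omega) hdis hndl
    have hlen1 : ((pvOuter arr k (x, vis) b0).1).length = k.toNat := by
      rw [pvOuter, pvInner_len]; exact hx
    have hinv' : ∀ i ∈ vis ++ pvStride arr k b0, ∀ b ∈ t, i ∉ pvStride arr k b := by
      intro i hi b hb hib
      have hbb := hbnd b (List.mem_cons_of_mem _ hb)
      have hbne : b ≠ b0 := by
        intro h; exact (List.nodup_cons.mp hnd).1 (h ▸ hb)
      rcases List.mem_append.mp hi with hiv | his
      · exact hinv i hiv b (List.mem_cons_of_mem _ hb) hib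
      · have h1 := ((pvMem_stride hk hb0.1 hb0.2 i).mp his).2.2
        have h2 := ((pvMem_stride hk hbb.1 hbb.2 i).mp hib).2.2
        exact hbne (by omega)
    rw [List.foldl_cons, hpair, hsnd,
      ih _ _ j hlen1 (fun b hb => hbnd b (List.mem_cons_of_mem _ hb)) hnd.of_cons hinv' hj,
      hfst j]
    by_cases hj0 : (j : Int) = b0
    · have hjn : j = b0.toNat := by omega
      have hnt : (j : Int) ∉ t := by rw [hj0]; exact (List.nodup_cons.mp hnd).1
      rw [if_neg hnt, if_pos hjn, if_pos (List.mem_cons.mpr (Or.inl hj0)), hj0]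
    · have hjne : j ≠ b0.toNat := by
        have := hb0.1; omega
      rw [if_neg hjne]
      by_cases hjt : (j : Int) ∈ t
      · rw [if_pos hjt, if_pos (List.mem_cons.mpr (Or.inr hjt))]
      · rw [if_neg hjt, if_neg (by simp [hj0, hjt])]

theorem pvA_eq_target (arr : List Int) (k : Int) (hk : 0 < k) :
    beggars arr k = pvTarget arr k := by
  have hAdef : beggars arr k =
      ((PySem.List.pyRange 0 k 1).foldl (pvOuter arr k)
        (List.replicate k.toNat 0, (PySem.Set.empty : PySem.Set Int))).1 := rfl
  have hlen : (beggars arr k).length = k.toNat := by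
    rw [hAdef, pvOuter_len]; simp
  have hlent : (pvTarget arr k).length = k.toNat := by simp [pvTarget]
  apply List.ext_getElem (by omega)
  intro j h1 h2
  have hj : j < k.toNat := by omega
  rw [← List.getD_eq_getElem _ 0 h1, hAdef,
    pvOuter_getD arr hk _ _ _ j (by simp)
      (fun b hb => by rw [PySem.List.mem_pyRange_one] at hb; exact hb)
      (PySem.List.nodup_pyRange_one 0 k) (by intro i hi; simp at hi) hj]
  have hmem : (j : Int) ∈ PySem.List.pyRange 0 k 1 := by
    rw [PySem.List.mem_pyRange_one]; omega
  simp [hmem, pvTarget]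

theorem pvA_nonpos (arr : List Int) (k : Int) (hk : k ≤ 0) : beggars arr k = [] := by
  have h1 : PySem.List.pyRange 0 k 1 = [] := PySem.List.pyRange_one_eq_nil hk
  have h2 : k.toNat = 0 := by omega
  simp [beggars, h1, h2]

-- ===== VERDICT (by name: the statement is the Claim_ definition above) =====
theorem beggars_spec : Claim_equal_beggars := by
  intro arr k _
  unfold Spec_beggars
  by_cases hk : 0 < k
  · rw [pvA_eq_target arr k hk, pvB_eq_target arr k hk]
  · rw [pvA_nonpos arr k (by omega)]
    have hle : k ≤ 0 := by omega
    simp [beggars_alt, hle]
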